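-- pv_equiv track=rewrite | github.com/y-bow/PDS-Lab | Python/Lab2/Q12.py | moveDups
-- ===== SOURCE A (Python) =====
-- def moveDups(s):
--     seen = set()
--     unique = ''
--     dups = ''
--     for char in s:
--         if char not in seen:
--             seen.add(char)
--             unique += char
--         else:
--             dups += char
--     return unique + ' ' + dups
-- ===== SOURCE B (Python) =====
-- def moveDups(s):
--     first = {}
--     for i, c in enumerate(s):
--         if c not in first:
--             first[c] = i
--     unique = ''.join(first)
--     dups = ''.join(c for i, c in enumerate(s) if first[c] != i)
--     return unique + ' ' + dups
-- ===== Notes on version B (the rewrite author's own statement) =====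
-- stated objective: alternative
-- what changed: Replaces the single set-accumulating loop (seen set + two growing strings) with a first-occurrence-index dict built in one pass, unique taken as the dict's keys and duplicates recovered by a separate index-comparing pass (kept iff its index is not the first occurrence).
import Mathlib
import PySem

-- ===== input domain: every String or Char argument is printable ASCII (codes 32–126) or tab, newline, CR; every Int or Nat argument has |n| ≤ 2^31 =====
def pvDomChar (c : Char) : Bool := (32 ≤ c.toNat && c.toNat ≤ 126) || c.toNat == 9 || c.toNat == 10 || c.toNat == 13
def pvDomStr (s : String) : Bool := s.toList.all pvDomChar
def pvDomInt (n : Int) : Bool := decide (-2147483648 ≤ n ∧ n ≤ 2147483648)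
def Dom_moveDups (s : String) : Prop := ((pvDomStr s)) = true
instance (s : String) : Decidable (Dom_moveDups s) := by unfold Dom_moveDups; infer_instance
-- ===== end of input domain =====

-- B keeps a first-occurrence-index dict instead of A's seen-set; unique = the dict's keys,
-- dups = a second index-comparing pass; alternative decomposition, same cost, return value only.

-- ===== PORT A =====
-- the loop: for char in s: if char not in seen: seen.add; unique += char else dups += char
def moveDupsLoop : List Char → PySem.Set Char → List Char → List Char → List Char × List Char
  | [], _, u, d => (u, d)
  | c :: rest, seen, u, d =>
    if PySem.Set.contains seen c then
      moveDupsLoop rest seen u (d ++ [c])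
    else
      moveDupsLoop rest (PySem.Set.add seen c) (u ++ [c]) d

def moveDups (s : String) : String :=
  let r := moveDupsLoop s.toList PySem.Set.empty [] []
  String.ofList (r.1 ++ ' ' :: r.2)

-- ===== PORT B =====
-- for i, c in enumerate(s): if c not in first: first[c] = i
def buildFirst : List Char → Nat → PySem.Dict Char Nat → PySem.Dict Char Nat
  | [], _, d => d
  | c :: rest, i, d =>
    buildFirst rest (i + 1) (if d.contains c then d else d.insert c i)

-- ''.join(c for i, c in enumerate(s) if first[c] != i); first[c] always hits (key error unreachable)
def dupsOf : List Char → Nat → PySem.Dict Char Nat → List Char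
  | [], _, _ => []
  | c :: rest, i, first =>
    match first.get? c with
    | some j => if j = i then dupsOf rest (i + 1) first else c :: dupsOf rest (i + 1) first
    | none => dupsOf rest (i + 1) first

def moveDups_alt (s : String) : String :=
  let cs := s.toList
  let first := buildFirst cs 0 PySem.Dict.empty
  let unique := first.keys
  let dups := dupsOf cs 0 first
  String.ofList (unique ++ ' ' :: dups)

-- ===== PRECONDITION & SPEC =====
def Spec_moveDups (s : String) (out : String) : Prop := out = moveDups_alt s
instance (s : String) (out : String) : Decidable (Spec_moveDups s out) := by unfold Spec_moveDups; infer_instance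

-- ===== CLAIM (what is proved, stated in full; the proofs are below) =====
def Claim_equal_moveDups : Prop := ∀ (s : String), Dom_moveDups s → Spec_moveDups s (moveDups s)

-- ===== LEMMAS AND PROOFS =====

-- buildFirst never changes the value stored for a key already present
lemma buildFirst_get?_preserved (cs : List Char) :
    ∀ (i : Nat) (d : PySem.Dict Char Nat) (c : Char), d.contains c = true →
      (buildFirst cs i d).get? c = d.get? c := by
  induction cs with
  | nil => intro i d c _; rfl
  | cons x rest ih =>
    intro i d c hc
    simp only [buildFirst]
    by_cases hx : d.contains x = true
    · rw [if_pos hx]; exact ih (i+1) d c hc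
    · rw [if_neg hx]
      have hcont : (d.insert x i).contains c = true := by
        simp [PySem.Dict.contains_insert, hc]
      rw [ih (i+1) _ c hcont]
      by_cases hcx : c = x
      · subst hcx; exact absurd hc hx
      · rw [PySem.Dict.get?_insert_of_ne _ _ hcx]

lemma key_lemma (cs : List Char) :
    ∀ (i : Nat) (seen : PySem.Set Char) (dict : PySem.Dict Char Nat)
      (u d : List Char),
      (∀ c, PySem.Set.contains seen c = dict.contains c) →
      dict.keys = u →
      (∀ c j, dict.get? c = some j → j < i) →
      moveDupsLoop cs seen u d =
        ((buildFirst cs i dict).keys, d ++ dupsOf cs i (buildFirst cs i dict)) := by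
  induction cs with
  | nil =>
    intro i seen dict u d h1 h2 _
    simp [moveDupsLoop, buildFirst, dupsOf, h2]
  | cons c rest ih =>
    intro i seen dict u d h1 h2 h3
    simp only [moveDupsLoop, buildFirst]
    by_cases hc : dict.contains c = true
    · -- duplicate branch
      rw [if_pos (by rw [h1 c]; exact hc)]
      rw [if_pos hc]
      have hsome : ∃ j, dict.get? c = some j := by
        rw [PySem.Dict.contains_eq_isSome_get?] at hc
        exact Option.isSome_iff_exists.mp hc
      obtain ⟨j, hj⟩ := hsome
      have hjlt : j < i := h3 c j hj
      have hpres := buildFirst_get?_preserved rest (i+1) dict c hc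
      rw [ih (i+1) seen dict u (d ++ [c]) h1 h2
        (fun c' j' hj' => Nat.lt_succ_of_lt (h3 c' j' hj'))]
      simp only [dupsOf, hpres, hj]
      rw [if_neg (Nat.ne_of_lt hjlt)]
      simp
    · -- first-occurrence branch
      rw [if_neg (by rw [h1 c]; simpa using hc)]
      rw [if_neg hc]
      have hb1 : ∀ c', PySem.Set.contains (PySem.Set.add seen c) c'
          = (dict.insert c i).contains c' := by
        intro c'
        rw [PySem.Dict.contains_insert]
        have hm : c' ∈ seen.add c ↔ c' ∈ seen ∨ c' = c := PySem.Set.mem_add seen c c'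
        have h1' := h1 c'
        simp only [PySem.Set.contains, List.contains_eq_mem] at h1' ⊢
        by_cases h : c' = c
        · subst h; simp [hm]
        · have hbc : (c' == c) = false := by simp [h]
          simp only [hm, h, or_false, hbc, Bool.false_or]
          exact h1'
      have hb2 : (dict.insert c i).keys = u ++ [c] := by
        rw [PySem.Dict.keys_insert_of_not_contains _ _ (by simpa using hc), h2]
      have hb3 : ∀ c' j', (dict.insert c i).get? c' = some j' → j' < i + 1 := by
        intro c' j' hj'
        by_cases h : c' = c
        · subst h; rw [PySem.Dict.get?_insert_self] at hj'
          cases hj'; omega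
        · rw [PySem.Dict.get?_insert_of_ne _ _ h] at hj'
          exact Nat.lt_succ_of_lt (h3 c' j' hj')
      rw [ih (i+1) (PySem.Set.add seen c) (dict.insert c i) (u ++ [c]) d hb1 hb2 hb3]
      have hcont : (dict.insert c i).contains c = true := PySem.Dict.contains_insert_self _ _ _
      have hpres := buildFirst_get?_preserved rest (i+1) (dict.insert c i) c hcont
      simp [dupsOf, hpres, PySem.Dict.get?_insert_self]

-- ===== VERDICT (by name: the statement is the Claim_ definition above) =====
theorem moveDups_spec : Claim_equal_moveDups := by
  intro s _
  unfold Spec_moveDups moveDups moveDups_alt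
  have h := key_lemma s.toList 0 PySem.Set.empty PySem.Dict.empty [] []
    (by intro c; simp [PySem.Set.empty, PySem.Set.contains, PySem.Dict.contains_empty])
    (by simp [PySem.Dict.keys_empty])
    (by intro c j hj; simp [PySem.Dict.get?_empty] at hj)
  simp only [h, List.nil_append]
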